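-- pv_equiv track=rewrite | github.com/Georgi-Raykov/Python-fundamentals | Text  processing/Character Multiplier.py | multiply_chars
-- ===== SOURCE A (Python) =====
-- def multiply_chars(first, second):
--     total_result = 0
--     for i in range(len(first)):
--
--         if i < len(second):
--             total_result += ord(first[i]) * ord(second[i])
--         else:
--             total_result += ord(first[i])
--     return total_result
-- ===== SOURCE B (Python) =====
-- def multiply_chars(first, second):
--     # Algebraic reformulation: ord(a)*ord(b) = ord(a) + ord(a)*(ord(b)-1),
--     # so the answer is the plain sum of all char codes of `first` plus a
--     # correction term for each paired character. No branch, no tail handling.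
--     total = sum(map(ord, first))
--     for a, b in zip(first, second):
--         total += ord(a) * (ord(b) - 1)
--     return total
-- ===== Notes on version B (the rewrite author's own statement) =====
-- stated objective: alternative
-- what changed: Uses the identity ord(a)*ord(b) = ord(a) + ord(a)*(ord(b)-1): B first sums the codes of ALL of first unconditionally, then adds an ord(a)*(ord(b)-1) correction per paired character, eliminating A's per-index branch and any tail/overlap case split.
import Mathlib
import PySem

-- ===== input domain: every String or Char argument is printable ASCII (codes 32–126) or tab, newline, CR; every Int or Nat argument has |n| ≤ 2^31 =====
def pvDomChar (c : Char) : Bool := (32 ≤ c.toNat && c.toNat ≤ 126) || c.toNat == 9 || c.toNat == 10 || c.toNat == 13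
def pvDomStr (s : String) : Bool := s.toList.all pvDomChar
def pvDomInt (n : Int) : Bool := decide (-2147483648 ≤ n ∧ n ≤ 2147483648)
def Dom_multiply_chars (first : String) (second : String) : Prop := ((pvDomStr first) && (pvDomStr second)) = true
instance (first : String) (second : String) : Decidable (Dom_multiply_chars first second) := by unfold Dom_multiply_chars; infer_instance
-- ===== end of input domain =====

-- B replaces A's branching indexed loop by an algebraic reformulation: sum all codes of `first` once, then add ord(a)*(ord(b)-1) per paired character; same cost, no case split.


-- ===== PORT A =====
-- for i in range(len(first)): if i < len(second): total += ord(first[i])*ord(second[i]) else: total += ord(first[i])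
def multiply_chars (first : String) (second : String) : Int :=
  let f := first.toList
  let s := second.toList
  (PySem.List.pyRange 0 (f.length : Int) 1).foldl
    (fun total i =>
      if i < (s.length : Int) then
        total + ((PySem.List.pyGetD f i ' ').toNat : Int) * ((PySem.List.pyGetD s i ' ').toNat : Int)
      else
        total + ((PySem.List.pyGetD f i ' ').toNat : Int)) 0

-- ===== PORT B =====
-- total = sum(map(ord, first)); for a, b in zip(first, second): total += ord(a) * (ord(b) - 1)
def multiply_chars_alt (first : String) (second : String) : Int :=
  let base : Int := (first.toList.map (fun c => (c.toNat : Int))).sum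
  (first.toList.zip second.toList).foldl
    (fun total p => total + (p.1.toNat : Int) * ((p.2.toNat : Int) - 1)) base

-- ===== PRECONDITION & SPEC =====
def Spec_multiply_chars (first : String) (second : String) (out : Int) : Prop := out = multiply_chars_alt first second
instance (first : String) (second : String) (out : Int) : Decidable (Spec_multiply_chars first second out) := by unfold Spec_multiply_chars; infer_instance

-- ===== CLAIM =====
def Claim_equal_multiply_chars : Prop := ∀ (first : String) (second : String), Dom_multiply_chars first second → Spec_multiply_chars first second (multiply_chars first second)

-- ===== LEMMAS AND PROOFS =====

-- the per-index term of A's loop, as a pure function of the index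
def pvTerm (f s : List Char) (i : Int) : Int :=
  if i < (s.length : Int) then
    ((PySem.List.pyGetD f i ' ').toNat : Int) * ((PySem.List.pyGetD s i ' ').toNat : Int)
  else
    ((PySem.List.pyGetD f i ' ').toNat : Int)

lemma pvTerm_prefix (f s : List Char) (k : Nat) (hk : k < min f.length s.length) :
    pvTerm f s (k : Int) = ((f[k]'(by omega)).toNat : Int) * ((s[k]'(by omega)).toNat : Int) := by
  have hkf : k < f.length := by omega
  have hks : k < s.length := by omega
  simp [pvTerm, PySem.List.pyGetD_natCast, List.getD_eq_getElem?_getD,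
    List.getElem?_eq_getElem hkf, hks]

lemma pvTerm_tail (f s : List Char) (i : Int) (hi : (s.length : Int) ≤ i) (hif : 0 ≤ i) (hif2 : i < (f.length : Int)) :
    pvTerm f s i = (((f[i.toNat]'(by omega)).toNat : Int)) := by
  have h : ¬ i < (s.length : Int) := by omega
  unfold pvTerm
  rw [if_neg h, PySem.List.pyGetD_eq_getElem f ' ' hif hif2]

-- A's branching loop computes the zip-of-products sum plus the tail sum
lemma pv_main (f s : List Char) :
    (PySem.List.pyRange 0 (f.length : Int) 1).foldl
      (fun total i =>
        if i < (s.length : Int) then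
          total + ((PySem.List.pyGetD f i ' ').toNat : Int) * ((PySem.List.pyGetD s i ' ').toNat : Int)
        else
          total + ((PySem.List.pyGetD f i ' ').toNat : Int)) 0
    = ((f.zip s).map (fun p => ((p.1.toNat : Int) * (p.2.toNat : Int)))).sum
      + ((f.drop s.length).map (fun c => (c.toNat : Int))).sum := by
  set m : Nat := min f.length s.length with hm
  have hbody : (PySem.List.pyRange 0 (f.length : Int) 1).foldl
      (fun total i =>
        if i < (s.length : Int) then
          total + ((PySem.List.pyGetD f i ' ').toNat : Int) * ((PySem.List.pyGetD s i ' ').toNat : Int)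
        else
          total + ((PySem.List.pyGetD f i ' ').toNat : Int)) 0
      = (PySem.List.pyRange 0 (f.length : Int) 1).foldl (fun total i => total + pvTerm f s i) 0 := by
    apply PySem.List.foldl_congr_mem
    intro acc x _
    unfold pvTerm
    split <;> rfl
  rw [hbody, PySem.List.foldl_add, PySem.List.pyRange_one_append 0 (m : Int) (f.length : Int)
    (by positivity) (by omega), List.map_append, List.sum_append]
  have hpre : (PySem.List.pyRange 0 (m : Int) 1).map (pvTerm f s)
      = (f.zip s).map (fun p => ((p.1.toNat : Int) * (p.2.toNat : Int))) := by
    apply List.ext_getElem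
    · simp [PySem.List.length_pyRange_one, hm]; omega
    · intro k h1 h2
      have hk : k < m := by simpa [PySem.List.length_pyRange_one] using h1
      rw [List.getElem_map, List.getElem_map, PySem.List.getElem_pyRange_one]
      have : (0 : Int) + (k : Int) = (k : Int) := by ring
      rw [this, pvTerm_prefix f s k (by omega)]
      simp [List.getElem_zip]
  have htail : (PySem.List.pyRange (m : Int) (f.length : Int) 1).map (pvTerm f s)
      = (f.drop s.length).map (fun c => (c.toNat : Int)) := by
    apply List.ext_getElem
    · rw [List.length_map, List.length_map, PySem.List.length_pyRange_one, List.length_drop]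
      omega
    · intro k h1 h2
      rw [List.length_map, PySem.List.length_pyRange_one] at h1
      have hk : k < (((f.length : Int) - (m : Int)).toNat) := h1
      have hsf : s.length ≤ f.length := by
        by_contra h
        simp [hm] at hk; omega
      have hms : m = s.length := by omega
      rw [List.getElem_map, List.getElem_map, PySem.List.getElem_pyRange_one]
      rw [pvTerm_tail f s ((m : Int) + (k : Int)) (by omega) (by positivity) (by omega)]
      have hidx : ((m : Int) + (k : Int)).toNat = s.length + k := by omega
      simp [List.getElem_drop, hidx]
  rw [hpre, htail]
  ring

-- B's accumulating loop is its base plus the sum of the correction terms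
lemma pv_foldl_sum (l : List (Char × Char)) (c : Int) :
    l.foldl (fun total p => total + (p.1.toNat : Int) * ((p.2.toNat : Int) - 1)) c
      = c + (l.map (fun p => (p.1.toNat : Int) * ((p.2.toNat : Int) - 1))).sum := by
  induction l generalizing c with
  | nil => simp
  | cons a t ih => simp [List.foldl_cons, ih]; ring

-- the algebraic identity: full sum + corrections = zip products + tail sum
lemma pv_key (f s : List Char) :
    (f.map (fun c => (c.toNat : Int))).sum
      + ((f.zip s).map (fun p => (p.1.toNat : Int) * ((p.2.toNat : Int) - 1))).sum
    = ((f.zip s).map (fun p => ((p.1.toNat : Int) * (p.2.toNat : Int)))).sum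
      + ((f.drop s.length).map (fun c => (c.toNat : Int))).sum := by
  induction f generalizing s with
  | nil => simp
  | cons a t ih =>
    cases s with
    | nil => simp
    | cons b u =>
      have := ih u
      simp [List.zip_cons_cons, List.map_cons, List.sum_cons] at *
      linarith [this]

-- ===== VERDICT =====
theorem multiply_chars_spec : Claim_equal_multiply_chars := by
  intro first second _
  show multiply_chars first second = multiply_chars_alt first second
  unfold multiply_chars multiply_chars_alt
  rw [pv_main first.toList second.toList, pv_foldl_sum]
  exact (pv_key first.toList second.toList).symm
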